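-- pv_equiv track=rewrite | github.com/DavidCho1999/codevault | pipeline/_experiments/extract_tables_v8.py | filldown_none_cells
-- ===== SOURCE A (Python) =====
-- from copy import deepcopy
--
-- def filldown_none_cells(table_data):
--     """병합 셀 처리: None/빈 값을 위의 값으로 채움"""
--     if not table_data:
--         return table_data
--
--     result = deepcopy(table_data)
--     cols = len(result[0]) if result else 0
--
--     for col in range(cols):
--         last_value = None
--         for row in range(len(result)):
--             cell = result[row][col]
--             if cell is None or (isinstance(cell, str) and cell.strip() == ''):
--                 result[row][col] = last_value
--             else:
--                 last_value = cell
--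
--     return result
-- ===== SOURCE B (Python) =====
-- def filldown_none_cells(table_data):
--     """병합 셀 처리: None/빈 값을 위의 값으로 채움"""
--     if not table_data:
--         return table_data
--
--     cols = len(table_data[0])
--
--     def empty(c):
--         return c is None or (isinstance(c, str) and c.strip() == '')
--
--     # Row 0 normalised (empties become None), then each row fills its empty
--     # cells (within the first `cols` columns) from the already-filled row above.
--     prev = [None if empty(c) else c for c in table_data[0]]
--     out = [prev]
--     for row in table_data[1:]:
--         prev = [prev[i] if empty(row[i]) else row[i] for i in range(cols)] + row[cols:]
--         out.append(prev)
--     return out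
-- ===== Notes on version B (the rewrite author's own statement) =====
-- stated objective: alternative
-- what changed: Replaces A's column-major mutation of a deepcopy with a per-column last_value accumulator by a single row-major pass that builds fresh rows, each empty cell taking the already-filled cell directly above it; the accumulator is gone and the recurrence flows through the output rows themselves.
import Mathlib
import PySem

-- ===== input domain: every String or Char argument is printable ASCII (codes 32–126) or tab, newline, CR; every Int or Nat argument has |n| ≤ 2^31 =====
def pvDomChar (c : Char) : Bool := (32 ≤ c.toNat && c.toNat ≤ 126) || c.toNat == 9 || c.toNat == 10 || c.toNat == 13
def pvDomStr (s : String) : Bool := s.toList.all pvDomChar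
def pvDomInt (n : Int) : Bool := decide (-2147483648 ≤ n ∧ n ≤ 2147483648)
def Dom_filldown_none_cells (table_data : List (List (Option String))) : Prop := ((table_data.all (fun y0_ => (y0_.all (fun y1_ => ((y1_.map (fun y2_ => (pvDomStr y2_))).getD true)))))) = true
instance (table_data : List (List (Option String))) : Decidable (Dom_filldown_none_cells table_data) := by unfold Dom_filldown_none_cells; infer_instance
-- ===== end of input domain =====

-- B replaces the column-major last_value accumulator over a mutated deepcopy by a
-- row-major pass in which each empty cell copies the already-filled cell above it.

-- "cell is None or (isinstance(cell, str) and cell.strip() == '')"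
def pvEmptyCell (c : Option String) : Bool :=
  match c with
  | none => true
  | some s => PySem.Str.strip s == ""

-- ===== PORT A =====
-- one iteration of "for row in range(len(result))" for a fixed column
def pvFillColStep (col : Nat) (st : List (List (Option String)) × Option String) (row : Nat) :
    List (List (Option String)) × Option String :=
  let cell := (st.1.getD row []).getD col none
  if pvEmptyCell cell then
    (st.1.set row ((st.1.getD row []).set col st.2), st.2)
  else
    (st.1, cell)

-- the body of "for col in range(cols)": last_value = None, then the row loop
def pvFillColA (res : List (List (Option String))) (col : Nat) : List (List (Option String)) :=
  ((List.range res.length).foldl (pvFillColStep col) (res, none)).1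

def filldown_none_cells (table_data : List (List (Option String))) : List (List (Option String)) :=
  if table_data.isEmpty then table_data
  else
    let cols := (table_data.headD []).length
    (List.range cols).foldl pvFillColA table_data

-- ===== PORT B =====
-- "[prev[i] if empty(row[i]) else row[i] for i in range(cols)] + row[cols:]"
-- (indexing is total here; inside Pre_ every index used is in range, as in the Python)
def pvFillRowB (cols : Nat) (prev row : List (Option String)) : List (Option String) :=
  (List.range cols).map (fun i =>
    if pvEmptyCell (row.getD i none) then prev.getD i none else row.getD i none)
  ++ row.drop cols

def filldown_none_cells_alt (table_data : List (List (Option String))) : List (List (Option String)) :=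
  match table_data with
  | [] => table_data
  | r0 :: rest =>
    let cols := r0.length
    let prev0 := r0.map (fun c => if pvEmptyCell c then none else c)
    (rest.foldl
      (fun (st : List (List (Option String)) × List (Option String)) row =>
        let nr := pvFillRowB cols st.2 row
        (st.1 ++ [nr], nr))
      ([prev0], prev0)).1

-- ===== PRECONDITION & SPEC =====
-- Pre_ excludes ragged tables in which some row is shorter than row 0: there the
-- Python A raises IndexError on result[row][col] (and B raises likewise).
def Pre_filldown_none_cells (table_data : List (List (Option String))) : Prop :=
  ∀ r ∈ table_data, (table_data.headD []).length ≤ r.length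

instance (table_data : List (List (Option String))) : Decidable (Pre_filldown_none_cells table_data) := by
  unfold Pre_filldown_none_cells; infer_instance

def pvWitness_filldown_none_cells : List (List (Option String)) :=
  [[some "a", none], [some " ", some "b"], [none, some ""]]

def Spec_filldown_none_cells (table_data : List (List (Option String))) (out : List (List (Option String))) : Prop := out = filldown_none_cells_alt table_data
instance (table_data : List (List (Option String))) (out : List (List (Option String))) : Decidable (Spec_filldown_none_cells table_data out) := by unfold Spec_filldown_none_cells; infer_instance

-- ===== CLAIM (what is proved, stated in full; the proofs are below) =====
def Claim_equal_filldown_none_cells : Prop := ∀ (table_data : List (List (Option String))), Dom_filldown_none_cells table_data → Pre_filldown_none_cells table_data → Spec_filldown_none_cells table_data (filldown_none_cells table_data)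

-- ===== LEMMAS AND PROOFS =====

-- generic getD facts
theorem pvListEqOfGetD {α : Type} (d : α) :
    ∀ (l1 l2 : List α), l1.length = l2.length → (∀ r, l1.getD r d = l2.getD r d) → l1 = l2 := by
  intro l1
  induction l1 with
  | nil => intro l2 hl _; cases l2 <;> simp_all
  | cons x xs ih =>
    intro l2 hl h
    cases l2 with
    | nil => simp at hl
    | cons y ys =>
      have h0 := h 0
      simp at h0
      have := ih ys (by simpa using hl) (fun r => by simpa using h (r + 1))
      simp [h0, this]

theorem pvGetD_set_self {α : Type} (d v : α) :
    ∀ (l : List α) (i : Nat), i < l.length → (l.set i v).getD i d = v := by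
  intro l
  induction l with
  | nil => intro i h; simp at h
  | cons x xs ih =>
    intro i h
    cases i with
    | zero => simp
    | succ j => simpa using ih j (by simpa using h)

theorem pvGetD_set_ne {α : Type} (d v : α) :
    ∀ (l : List α) (i c : Nat), c ≠ i → (l.set i v).getD c d = l.getD c d := by
  intro l
  induction l with
  | nil => intro i c _; simp
  | cons x xs ih =>
    intro i c hne
    cases i with
    | zero => cases c with
      | zero => exact absurd rfl hne
      | succ m => simp
    | succ j => cases c with
      | zero => simp
      | succ m => simpa using ih j m (by omega)

theorem pvGetD_drop {α : Type} (d : α) :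
    ∀ (l : List α) (n m : Nat), (l.drop n).getD m d = l.getD (n + m) d := by
  intro l
  induction l with
  | nil => intro n m; simp
  | cons x xs ih =>
    intro n m
    cases n with
    | zero => simp
    | succ k => simpa [Nat.succ_add] using ih k m

theorem pvGetD_append_len {α : Type} (d : α) :
    ∀ (l1 : List α) (x : α) (l2 : List α), (l1 ++ x :: l2).getD l1.length d = x := by
  intro l1
  induction l1 with
  | nil => intro x l2; simp
  | cons y ys ih => intro x l2; simpa using ih x l2

theorem pvSet_append_len {α : Type} (v : α) :
    ∀ (l1 : List α) (x : α) (l2 : List α), (l1 ++ x :: l2).set l1.length v = l1 ++ v :: l2 := by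
  intro l1
  induction l1 with
  | nil => intro x l2; simp
  | cons y ys ih => intro x l2; simp [ih x l2]

-- entry of a matrix (getD-based, total)
def pvEnt (M : List (List (Option String))) (r c : Nat) : Option String :=
  (M.getD r []).getD c none

def pvColOf (M : List (List (Option String))) (c : Nat) : List (Option String) :=
  M.map (fun row => row.getD c none)

-- the shared per-column fill recurrence
def pvColFill (last : Option String) : List (Option String) → List (Option String)
  | [] => []
  | x :: xs => if pvEmptyCell x then last :: pvColFill last xs else x :: pvColFill x xs

theorem pvColFill_pos (last x : Option String) (xs : List (Option String))
    (h : pvEmptyCell x = true) : pvColFill last (x :: xs) = last :: pvColFill last xs := by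
  simp only [pvColFill]; rw [if_pos h]

theorem pvColFill_neg (last x : Option String) (xs : List (Option String))
    (h : ¬ pvEmptyCell x = true) : pvColFill last (x :: xs) = x :: pvColFill x xs := by
  simp only [pvColFill]; rw [if_neg h]

-- ---- A side ----
def pvMcf (col : Nat) (last : Option String) : List (List (Option String)) → List (List (Option String))
  | [] => []
  | r :: rs =>
    if pvEmptyCell (r.getD col none) then (r.set col last) :: pvMcf col last rs
    else r :: pvMcf col (r.getD col none) rs

def pvLastF (col : Nat) (last : Option String) : List (List (Option String)) → Option String
  | [] => last
  | r :: rs =>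
    if pvEmptyCell (r.getD col none) then pvLastF col last rs else pvLastF col (r.getD col none) rs

theorem pvMcf_pos (col : Nat) (last : Option String) (r : List (Option String))
    (rs : List (List (Option String))) (h : pvEmptyCell (r.getD col none) = true) :
    pvMcf col last (r :: rs) = (r.set col last) :: pvMcf col last rs := by
  simp only [pvMcf]; rw [if_pos h]

theorem pvMcf_neg (col : Nat) (last : Option String) (r : List (Option String))
    (rs : List (List (Option String))) (h : ¬ pvEmptyCell (r.getD col none) = true) :
    pvMcf col last (r :: rs) = r :: pvMcf col (r.getD col none) rs := by
  simp only [pvMcf]; rw [if_neg h]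

theorem pvLastF_pos (col : Nat) (last : Option String) (r : List (Option String))
    (rs : List (List (Option String))) (h : pvEmptyCell (r.getD col none) = true) :
    pvLastF col last (r :: rs) = pvLastF col last rs := by
  simp only [pvLastF]; rw [if_pos h]

theorem pvLastF_neg (col : Nat) (last : Option String) (r : List (Option String))
    (rs : List (List (Option String))) (h : ¬ pvEmptyCell (r.getD col none) = true) :
    pvLastF col last (r :: rs) = pvLastF col (r.getD col none) rs := by
  simp only [pvLastF]; rw [if_neg h]

theorem pvFold_mcf (col : Nat) :
    ∀ (todo done : List (List (Option String))) (last : Option String),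
      (List.range' done.length todo.length).foldl (pvFillColStep col) (done ++ todo, last)
        = (done ++ pvMcf col last todo, pvLastF col last todo) := by
  intro todo
  induction todo with
  | nil => intro done last; simp [pvMcf, pvLastF]
  | cons x xs ih =>
    intro done last
    simp only [List.length_cons]
    rw [List.range'_succ, List.foldl_cons]
    by_cases h : pvEmptyCell (x.getD col none)
    · have step : pvFillColStep col (done ++ x :: xs, last) done.length
          = (done ++ (x.set col last) :: xs, last) := by
        unfold pvFillColStep
        dsimp only
        rw [pvGetD_append_len, if_pos h, pvSet_append_len]
      rw [step, pvMcf_pos col last x xs h, pvLastF_pos col last x xs h]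
      have := ih (done ++ [x.set col last]) last
      simpa using this
    · have step : pvFillColStep col (done ++ x :: xs, last) done.length
          = (done ++ x :: xs, x.getD col none) := by
        unfold pvFillColStep
        dsimp only
        rw [pvGetD_append_len, if_neg h]
      rw [step, pvMcf_neg col last x xs h, pvLastF_neg col last x xs h]
      have := ih (done ++ [x]) (x.getD col none)
      simpa using this

theorem pvFillColA_eq (M : List (List (Option String))) (col : Nat) :
    pvFillColA M col = pvMcf col none M := by
  have := pvFold_mcf col M [] none
  simp only [List.nil_append, List.length_nil] at this
  simp [pvFillColA, List.range_eq_range', this]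

theorem pvMcf_length (col : Nat) (last : Option String) :
    ∀ M, (pvMcf col last M).length = M.length := by
  intro M
  induction M generalizing last with
  | nil => simp [pvMcf]
  | cons r rs ih =>
    by_cases h : pvEmptyCell (r.getD col none)
    · rw [pvMcf_pos col last r rs h]; simp [ih]
    · rw [pvMcf_neg col last r rs h]; simp [ih]

theorem pvMcf_rowlen (col : Nat) :
    ∀ M last r, ((pvMcf col last M).getD r []).length = (M.getD r []).length := by
  intro M
  induction M with
  | nil => intro last r; simp [pvMcf]
  | cons x xs ih =>
    intro last r
    by_cases h : pvEmptyCell (x.getD col none)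
    · rw [pvMcf_pos col last x xs h]
      cases r with
      | zero => simp
      | succ m => simpa using ih last m
    · rw [pvMcf_neg col last x xs h]
      cases r with
      | zero => simp
      | succ m => simpa using ih (x.getD col none) m

theorem pvColOf_getD : ∀ (N : List (List (Option String))) (c r : Nat),
    (pvColOf N c).getD r none = pvEnt N r c := by
  intro N
  induction N with
  | nil => intro c r; simp [pvColOf, pvEnt]
  | cons x xs ih =>
    intro c r
    cases r with
    | zero => simp [pvColOf, pvEnt]
    | succ m => simpa [pvColOf, pvEnt] using ih c m

theorem pvColOf_cons (x : List (Option String)) (xs : List (List (Option String))) (c : Nat) :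
    pvColOf (x :: xs) c = x.getD c none :: pvColOf xs c := rfl

theorem pvEnt_cons_zero (x : List (Option String)) (xs : List (List (Option String))) (c : Nat) :
    pvEnt (x :: xs) 0 c = x.getD c none := rfl

theorem pvEnt_cons_succ (x : List (Option String)) (xs : List (List (Option String))) (m c : Nat) :
    pvEnt (x :: xs) (m + 1) c = pvEnt xs m c := rfl

theorem pvEnt_mcf (col : Nat) :
    ∀ (M : List (List (Option String))) (last : Option String),
      (∀ r, r < M.length → col < (M.getD r []).length) →
      ∀ r c, pvEnt (pvMcf col last M) r c
        = if c = col then (pvColFill last (pvColOf M col)).getD r none else pvEnt M r c := by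
  intro M
  induction M with
  | nil => intro last _ r c; simp [pvMcf, pvEnt, pvColOf, pvColFill]
  | cons row rs ih =>
    intro last hcol r c
    have hrow : col < row.length := by simpa using hcol 0 (by simp)
    have hrest : ∀ r, r < rs.length → col < (rs.getD r []).length := by
      intro r hr; simpa using hcol (r + 1) (by simpa using Nat.succ_lt_succ hr)
    by_cases h : pvEmptyCell (row.getD col none)
    · rw [pvMcf_pos col last row rs h, pvColOf_cons, pvColFill_pos _ _ _ h]
      cases r with
      | zero =>
        rw [pvEnt_cons_zero]
        by_cases hc : c = col
        · subst hc
          rw [if_pos rfl, pvGetD_set_self _ _ _ _ hrow]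
          simp
        · rw [if_neg hc, pvGetD_set_ne _ _ _ _ _ hc, pvEnt_cons_zero]
      | succ m =>
        rw [pvEnt_cons_succ, pvEnt_cons_succ, ih last hrest m c]
        by_cases hc : c = col <;> simp [hc]
    · rw [pvMcf_neg col last row rs h, pvColOf_cons, pvColFill_neg _ _ _ h]
      cases r with
      | zero =>
        rw [pvEnt_cons_zero]
        by_cases hc : c = col
        · subst hc; rw [if_pos rfl]; simp
        · rw [if_neg hc, pvEnt_cons_zero]
      | succ m =>
        rw [pvEnt_cons_succ, pvEnt_cons_succ, ih (row.getD col none) hrest m c]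
        by_cases hc : c = col <;> simp [hc]

def pvApplyCols (M : List (List (Option String))) (k : Nat) : List (List (Option String)) :=
  (List.range k).foldl pvFillColA M

theorem pvApplyCols_char (M : List (List (Option String))) :
    ∀ k, (∀ r, r < M.length → k ≤ (M.getD r []).length) →
      (pvApplyCols M k).length = M.length
      ∧ (∀ r, ((pvApplyCols M k).getD r []).length = (M.getD r []).length)
      ∧ (∀ r c, pvEnt (pvApplyCols M k) r c
          = if c < k then (pvColFill none (pvColOf M c)).getD r none else pvEnt M r c) := by
  intro k
  induction k with
  | zero =>
    intro _
    refine ⟨rfl, fun r => rfl, fun r c => ?_⟩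
    simp [pvApplyCols]
  | succ n ih =>
    intro hlen
    have hlen' : ∀ r, r < M.length → n ≤ (M.getD r []).length := by
      intro r hr; exact Nat.le_of_succ_le (hlen r hr)
    obtain ⟨hL, hR, hE⟩ := ih hlen'
    have hstep : pvApplyCols M (n + 1) = pvMcf n none (pvApplyCols M n) := by
      simp [pvApplyCols, List.range_succ, pvFillColA_eq]
    have hcolbound : ∀ r, r < (pvApplyCols M n).length → n < ((pvApplyCols M n).getD r []).length := by
      intro r hr
      rw [hR r]
      exact Nat.lt_of_succ_le (hlen r (by rwa [hL] at hr))
    have hcolsame : pvColOf (pvApplyCols M n) n = pvColOf M n := by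
      apply pvListEqOfGetD none
      · simp [pvColOf, hL]
      · intro r
        rw [pvColOf_getD, pvColOf_getD, hE r n]
        simp
    constructor
    · rw [hstep, pvMcf_length, hL]
    constructor
    · intro r; rw [hstep, pvMcf_rowlen, hR r]
    · intro r c
      rw [hstep, pvEnt_mcf n (pvApplyCols M n) none hcolbound r c, hcolsame]
      by_cases hc : c = n
      · subst hc; simp
      · rw [if_neg hc, hE r c]
        by_cases h1 : c < n
        · rw [if_pos h1, if_pos (by omega)]
        · rw [if_neg h1, if_neg (by omega)]

-- ---- B side ----
def pvRowSpecB (cols : Nat) (prev : List (Option String)) :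
    List (List (Option String)) → List (List (Option String))
  | [] => []
  | r :: rs => pvFillRowB cols prev r :: pvRowSpecB cols (pvFillRowB cols prev r) rs

theorem pvFoldB_acc (cols : Nat) :
    ∀ (rs : List (List (Option String))) (acc : List (List (Option String))) (prev : List (Option String)),
      (rs.foldl
        (fun (st : List (List (Option String)) × List (Option String)) row =>
          let nr := pvFillRowB cols st.2 row
          (st.1 ++ [nr], nr))
        (acc, prev)).1 = acc ++ pvRowSpecB cols prev rs := by
  intro rs
  induction rs with
  | nil => intro acc prev; simp [pvRowSpecB]
  | cons r rest ih =>
    intro acc prev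
    simp only [List.foldl_cons]
    rw [ih]
    simp [pvRowSpecB]

theorem pvFillRowB_getD (cols : Nat) (prev row : List (Option String)) (c : Nat) :
    (pvFillRowB cols prev row).getD c none
      = if c < cols then
          (if pvEmptyCell (row.getD c none) then prev.getD c none else row.getD c none)
        else row.getD c none := by
  unfold pvFillRowB
  by_cases h : c < cols
  · rw [if_pos h, List.getD_append _ _ _ _ (by simpa using h)]
    simp [List.getD_eq_getElem?_getD, h]
  · rw [if_neg h]
    rw [List.getD_append_right _ _ _ _ (by simpa using Nat.le_of_not_lt h)]
    simp only [List.length_map, List.length_range]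
    rw [pvGetD_drop]
    congr 1
    omega

theorem pvFillRowB_length (cols : Nat) (prev row : List (Option String)) (h : cols ≤ row.length) :
    (pvFillRowB cols prev row).length = row.length := by
  simp [pvFillRowB]
  omega

theorem pvRowSpecB_char (cols : Nat) :
    ∀ (rows : List (List (Option String))) (prev : List (Option String)),
      (∀ r, r < rows.length → cols ≤ (rows.getD r []).length) →
      (pvRowSpecB cols prev rows).length = rows.length
      ∧ (∀ r, ((pvRowSpecB cols prev rows).getD r []).length = (rows.getD r []).length)
      ∧ (∀ r c, pvEnt (pvRowSpecB cols prev rows) r c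
          = if c < cols then (pvColFill (prev.getD c none) (pvColOf rows c)).getD r none
            else pvEnt rows r c) := by
  intro rows
  induction rows with
  | nil =>
    intro prev _
    refine ⟨rfl, fun r => rfl, fun r c => ?_⟩
    simp [pvRowSpecB, pvEnt, pvColOf, pvColFill]
  | cons row rs ih =>
    intro prev hrows
    have hrow : cols ≤ row.length := by simpa using hrows 0 (by simp)
    have hrest : ∀ r, r < rs.length → cols ≤ (rs.getD r []).length := by
      intro r hr; simpa using hrows (r + 1) (by simpa using Nat.succ_lt_succ hr)
    obtain ⟨ihL, ihR, ihE⟩ := ih (pvFillRowB cols prev row) hrest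
    refine ⟨by simp [pvRowSpecB, ihL], ?_, ?_⟩
    · intro r
      cases r with
      | zero => simpa [pvRowSpecB] using pvFillRowB_length cols prev row hrow
      | succ m => simpa [pvRowSpecB] using ihR m
    · intro r c
      cases r with
      | zero =>
        rw [show pvEnt (pvRowSpecB cols prev (row :: rs)) 0 c
              = (pvFillRowB cols prev row).getD c none from rfl]
        rw [pvFillRowB_getD]
        by_cases hc : c < cols
        · rw [if_pos hc, if_pos hc, pvColOf_cons]
          by_cases he : pvEmptyCell (row.getD c none)
          · rw [if_pos he, pvColFill_pos _ _ _ he]; simp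
          · rw [if_neg he, pvColFill_neg _ _ _ he]; simp
        · rw [if_neg hc, if_neg hc]; rfl
      | succ m =>
        rw [show pvEnt (pvRowSpecB cols prev (row :: rs)) (m + 1) c
              = pvEnt (pvRowSpecB cols (pvFillRowB cols prev row) rs) m c from rfl]
        rw [ihE m c]
        by_cases hc : c < cols
        · rw [if_pos hc, if_pos hc, pvColOf_cons]
          rw [pvFillRowB_getD, if_pos hc]
          by_cases he : pvEmptyCell (row.getD c none)
          · rw [if_pos he, pvColFill_pos _ _ _ he]; simp
          · rw [if_neg he, pvColFill_neg _ _ _ he]; simp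
        · rw [if_neg hc, if_neg hc]; rfl

-- first row of B: pointwise
theorem pvPrev0_getD (r0 : List (Option String)) (c : Nat) :
    ((r0.map (fun c => if pvEmptyCell c then none else c)).getD c none)
      = if pvEmptyCell (r0.getD c none) then none else r0.getD c none := by
  induction r0 generalizing c with
  | nil => simp [pvEmptyCell]
  | cons x xs ih =>
    cases c with
    | zero => simp
    | succ m => simpa using ih m

-- matrix extensionality via getD
theorem pvMatEq :
    ∀ (M N : List (List (Option String))), M.length = N.length →
      (∀ r, (M.getD r []).length = (N.getD r []).length) →
      (∀ r c, pvEnt M r c = pvEnt N r c) → M = N := by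
  intro M N hlen hrow hent
  apply pvListEqOfGetD ([] : List (Option String)) M N hlen
  intro r
  exact pvListEqOfGetD none _ _ (hrow r) (fun c => hent r c)

-- ===== VERDICT (by name: the statement is the Claim_ definition above) =====
theorem filldown_none_cells_spec : Claim_equal_filldown_none_cells := by
  intro t _ hpre
  unfold Spec_filldown_none_cells
  cases t with
  | nil => rfl
  | cons r0 rest =>
    have hidx : ∀ r, r < (r0 :: rest).length → r0.length ≤ ((r0 :: rest).getD r []).length := by
      intro r hr
      have hmem : (r0 :: rest).getD r [] ∈ r0 :: rest := by
        rw [List.getD_eq_getElem _ _ hr]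
        exact List.getElem_mem hr
      simpa using hpre _ hmem
    have hA : filldown_none_cells (r0 :: rest) = pvApplyCols (r0 :: rest) r0.length := by
      simp [filldown_none_cells, pvApplyCols]
    obtain ⟨aL, aR, aE⟩ := pvApplyCols_char (r0 :: rest) r0.length hidx
    have hB : filldown_none_cells_alt (r0 :: rest)
        = (r0.map (fun c => if pvEmptyCell c then none else c))
          :: pvRowSpecB r0.length (r0.map (fun c => if pvEmptyCell c then none else c)) rest := by
      show (rest.foldl _ ([r0.map (fun c => if pvEmptyCell c then none else c)],
              r0.map (fun c => if pvEmptyCell c then none else c))).1 = _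
      rw [pvFoldB_acc]
      rfl
    have hrestidx : ∀ r, r < rest.length → r0.length ≤ (rest.getD r []).length := by
      intro r hr; simpa using hidx (r + 1) (by simpa using Nat.succ_lt_succ hr)
    obtain ⟨bL, bR, bE⟩ :=
      pvRowSpecB_char r0.length rest (r0.map (fun c => if pvEmptyCell c then none else c)) hrestidx
    rw [hA, hB]
    apply pvMatEq
    · rw [aL]; simp [bL]
    · intro r
      rw [aR r]
      cases r with
      | zero => simp
      | succ m => simpa using (bR m).symm
    · intro r c
      rw [aE r c]
      cases r with
      | zero =>
        rw [pvEnt_cons_zero, pvEnt_cons_zero, pvPrev0_getD, pvColOf_cons]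
        by_cases hc : c < r0.length
        · rw [if_pos hc]
          by_cases he : pvEmptyCell (r0.getD c none)
          · rw [if_pos he, pvColFill_pos _ _ _ he]; simp
          · rw [if_neg he, pvColFill_neg _ _ _ he]; simp
        · rw [if_neg hc]
          have h0 : r0.getD c none = none := by
            apply List.getD_eq_default
            omega
          rw [h0]
          simp [pvEmptyCell]
      | succ m =>
        rw [pvEnt_cons_succ, pvEnt_cons_succ, bE m c]
        by_cases hc : c < r0.length
        · rw [if_pos hc, if_pos hc, pvColOf_cons, pvPrev0_getD]
          by_cases he : pvEmptyCell (r0.getD c none)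
          · rw [if_pos he, pvColFill_pos _ _ _ he]; simp
          · rw [if_neg he, pvColFill_neg _ _ _ he]; simp
        · rw [if_neg hc, if_neg hc]
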